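-- pv_equiv track=rewrite | github.com/ahecini/PyQChem | QChemFile.py | merge_coordinates
-- ===== SOURCE A (Python) =====
-- def merge_coordinates(s):
--     s1=s
--     s2=''
--     start=0
--     i=0
--     while i<=(len(s1)-1):
--         if s1[i][0]=='[':
--             start=i
--             while s1[i][-1]!=']':
--                 s2=s2+s1[i]
--                 del(s1[i])
--             else:
--                 s2=s2+s1[i]
--                 del(s1[i])
--                 s1.insert(start,s2)
--         i+=1
--         s2=''
--     return s1
-- ===== SOURCE B (Python) =====
-- def merge_coordinates(s):
--     out = []
--     buf = None
--     for x in s: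
--         if buf is not None:
--             buf += x
--             if x[-1] == ']':
--                 out.append(buf)
--                 buf = None
--         elif x[0] == '[' and x[-1] != ']':
--             buf = x
--         else:
--             out.append(x)
--     return out
-- ===== Notes on version B (the rewrite author's own statement) =====
-- stated objective: faster
-- what changed: Replaces A's in-place index scan with repeated del/insert on the list by a single forward pass that accumulates each '['..']' group in a merge buffer and appends to a fresh output list.
import Mathlib
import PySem

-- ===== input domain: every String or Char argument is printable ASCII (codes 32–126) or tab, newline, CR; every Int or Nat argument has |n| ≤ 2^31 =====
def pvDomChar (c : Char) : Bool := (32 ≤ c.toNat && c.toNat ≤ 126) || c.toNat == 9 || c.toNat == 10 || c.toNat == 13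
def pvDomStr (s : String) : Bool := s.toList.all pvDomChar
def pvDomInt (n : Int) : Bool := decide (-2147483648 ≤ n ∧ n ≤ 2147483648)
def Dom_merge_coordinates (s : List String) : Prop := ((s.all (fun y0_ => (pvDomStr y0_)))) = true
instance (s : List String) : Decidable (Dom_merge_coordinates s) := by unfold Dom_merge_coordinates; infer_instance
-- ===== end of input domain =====

-- B replaces A's quadratic in-place del/insert index scan by a single forward pass with a merge
-- buffer. A mutates its argument in place (B does not); the equivalence proved is about the
-- RETURN value only.

-- ===== PORT A =====
theorem pvGetLt {α : Type} {l : List α} {i : Nat} {a : α} (h : l[i]? = some a) : i < l.length := by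
  obtain ⟨hi, -⟩ := List.getElem?_eq_some_iff.mp h; exact hi

-- s1[i][0] == '['  (pyGet? "" _ = none, so this is false on "")
def pvOpens (x : String) : Bool := PySem.Str.pyGet? x 0 == some '['
-- s1[i][-1] == ']'
def pvCloses (x : String) : Bool := PySem.Str.pyGet? x (-1) == some ']'

-- inner 'while s1[i][-1]!=']': … else: …' loop of A: s2 accumulation, del s1[i], final insert(start, s2)
def mcInner (s1 : List String) (i : Nat) (s2 : String) (start : Nat) : List String :=
  match h : s1[i]? with
  | none => s1          -- Python raises IndexError here (outside Pre_)
  | some x =>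
    if pvCloses x = false then
      mcInner (s1.eraseIdx i) i (s2 ++ x) start      -- s2=s2+s1[i]; del s1[i]
    else
      PySem.List.insert (s1.eraseIdx i) (start : Int) (s2 ++ x)  -- else: s2=s2+s1[i]; del; insert
termination_by s1.length
decreasing_by
  have hi : i < s1.length := pvGetLt h
  simp [List.length_eraseIdx, hi]; omega

-- (mcInner never lengthens the list: needed for the outer loop's termination)
theorem mcInner_length_le_aux (n : Nat) : ∀ (s1 : List String) (i : Nat) (s2 : String) (start : Nat),
    s1.length ≤ n → (mcInner s1 i s2 start).length ≤ s1.length := by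
  induction n with
  | zero =>
      intro s1 i s2 start hn
      have : s1 = [] := List.eq_nil_of_length_eq_zero (by omega)
      subst this
      rw [mcInner]; simp
  | succ n ih =>
      intro s1 i s2 start hn
      rw [mcInner]
      split
      · exact le_refl _
      · rename_i x h
        have hi : i < s1.length := pvGetLt h
        have hel : (s1.eraseIdx i).length = s1.length - 1 := by
          simp [List.length_eraseIdx, hi]
        split
        · have := ih (s1.eraseIdx i) i (s2 ++ x) start (by omega)
          omega
        · have := PySem.List.length_insert (s1.eraseIdx i) (start : Int) (s2 ++ x)
          omega

theorem mcInner_length_le (s1 : List String) (i : Nat) (s2 : String) (start : Nat) :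
    (mcInner s1 i s2 start).length ≤ s1.length :=
  mcInner_length_le_aux s1.length s1 i s2 start (le_refl _)

-- outer 'while i<=(len(s1)-1)' loop of A (i ≥ 0 always; i ≤ len-1 ⇔ s1[i] exists)
def mcOuter (s1 : List String) (i : Nat) : List String :=
  match h : s1[i]? with
  | none => s1
  | some x =>
    if pvOpens x then mcOuter (mcInner s1 i "" i) (i + 1)   -- start=i, s2='' reset each turn
    else mcOuter s1 (i + 1)
termination_by s1.length - i
decreasing_by
  · have hi : i < s1.length := pvGetLt h
    have := mcInner_length_le s1 i "" i
    omega
  · have hi : i < s1.length := pvGetLt h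
    omega

def merge_coordinates (s : List String) : List String := mcOuter s 0

-- ===== PORT B =====
-- one step of B's for-loop: state = (out, buf) with buf the open merge buffer (None = closed)
def mergeStep (acc : List String × Option String) (x : String) : List String × Option String :=
  match acc with
  | (out, some buf) =>
      if pvCloses x then (out ++ [buf ++ x], none) else (out, some (buf ++ x))
  | (out, none) =>
      if pvOpens x && !pvCloses x then (out, some x) else (out ++ [x], none)

def merge_coordinates_alt (s : List String) : List String :=
  (s.foldl mergeStep ([], none)).1

-- ===== PRECONDITION & SPEC =====
-- Pre_: exactly the inputs on which the Python A returns (A raises IndexError on any empty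
-- string, and on a '['-opening element with no ']'-closing element at or after it).
def Pre_merge_coordinates (s : List String) : Prop :=
  (∀ x ∈ s, x ≠ "") ∧ ∀ t ∈ s.tails, pvOpens (t.headD "") = true → t.any pvCloses = true
instance (s : List String) : Decidable (Pre_merge_coordinates s) := by
  unfold Pre_merge_coordinates; infer_instance

def pvWitness_merge_coordinates : List String := ["[1.0", "2.0", "3.0]", "C"]

def Spec_merge_coordinates (s : List String) (out : List String) : Prop := out = merge_coordinates_alt s
instance (s : List String) (out : List String) : Decidable (Spec_merge_coordinates s out) := by unfold Spec_merge_coordinates; infer_instance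

-- ===== CLAIM (what is proved, stated in full; the proofs are below) =====
def Claim_equal_merge_coordinates : Prop := ∀ (s : List String), Dom_merge_coordinates s → Pre_merge_coordinates s → Spec_merge_coordinates s (merge_coordinates s)

-- ===== LEMMAS AND PROOFS =====

-- the merged group starting with accumulator acc: (some merged, rest) or (none, _) if unclosed
def pvGrab (acc : String) : List String → Option String × List String
  | [] => (none, [])
  | x :: xs => if pvCloses x then (some (acc ++ x), xs) else pvGrab (acc ++ x) xs

theorem pvGrab_suffix (l : List String) : ∀ acc, (pvGrab acc l).2 <:+ l := by
  induction l with
  | nil => intro acc; simp [pvGrab]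
  | cons x xs ih =>
      intro acc
      cases hc : pvCloses x
      · simp only [pvGrab, hc, Bool.false_eq_true, if_neg, not_false_iff]
        exact (ih (acc ++ x)).trans (List.suffix_cons x xs)
      · simp [pvGrab, hc]

theorem pvGrab_rest_length (acc : String) (x : String) (xs : List String) :
    ((pvGrab acc (x :: xs)).2).length ≤ xs.length := by
  cases hc : pvCloses x
  · simp only [pvGrab, hc, Bool.false_eq_true, if_neg, not_false_iff]
    exact (pvGrab_suffix xs (acc ++ x)).length_le
  · simp [pvGrab, hc]

-- reference function: the common value both loops compute
def pvMerge : List String → List String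
  | [] => []
  | x :: xs =>
    if pvOpens x then
      match h : pvGrab "" (x :: xs) with
      | (some m, r) => m :: pvMerge r
      | (none, _) => x :: xs      -- unreachable under pvClosed
    else x :: pvMerge xs
termination_by l => l.length
decreasing_by
  · have h2 := congrArg Prod.snd h
    simp only at h2
    have := pvGrab_rest_length "" x xs
    rw [h2] at this
    simp; omega
  · simp

theorem pvMerge_nil : pvMerge [] = [] := by rw [pvMerge]

theorem pvMerge_cons_not_open {x : String} {xs : List String} (ho : pvOpens x = false) :
    pvMerge (x :: xs) = x :: pvMerge xs := by
  rw [pvMerge]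
  rw [if_neg (by simp [ho])]

theorem pvMerge_cons_grab {x m : String} {xs r : List String} (ho : pvOpens x = true)
    (hg : pvGrab "" (x :: xs) = (some m, r)) : pvMerge (x :: xs) = m :: pvMerge r := by
  rw [pvMerge]
  rw [if_pos ho]
  split
  · rename_i m' r' h'
    rw [hg] at h'
    simp only [Prod.mk.injEq, Option.some.injEq] at h'
    rw [h'.1, h'.2]
  · rename_i h'
    rw [hg] at h'
    simp at h'

-- every '['-opener has a ']'-closer at or after it
def pvClosed : List String → Prop
  | [] => True
  | x :: xs => (pvOpens x = true → (x :: xs).any pvCloses = true) ∧ pvClosed xs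

theorem pvClosed_suffix {l l' : List String} (hs : l' <:+ l) (h : pvClosed l) : pvClosed l' := by
  induction l with
  | nil => rw [List.suffix_nil.mp hs]; exact h
  | cons x xs ih =>
      rcases List.suffix_cons_iff.mp hs with h1 | h2
      · rw [h1]; exact h
      · exact ih h2 h.2

theorem pvGrab_total (l : List String) : ∀ acc, l.any pvCloses = true →
    ∃ m r, pvGrab acc l = (some m, r) := by
  induction l with
  | nil => intro acc h; simp at h
  | cons x xs ih =>
      intro acc h
      cases hc : pvCloses x
      · have hxs : xs.any pvCloses = true := by
          simp only [List.any_cons, hc, Bool.false_or] at h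
          exact h
        obtain ⟨m, r, hm⟩ := ih (acc ++ x) hxs
        exact ⟨m, r, by simp [pvGrab, hc, hm]⟩
      · exact ⟨acc ++ x, xs, by simp [pvGrab, hc]⟩

theorem str_empty_append (s : String) : ("" : String) ++ s = s := by
  cases s; rfl

theorem pvEraseMid (done : List String) : ∀ (x : String) (xs : List String),
    (done ++ x :: xs).eraseIdx done.length = done ++ xs := by
  induction done with
  | nil => intro x xs; rfl
  | cons d ds ih => intro x xs; simp [List.eraseIdx_cons_succ, ih]

-- A's inner loop computes pvGrab
theorem innerA (l : List String) : ∀ (done : List String) (acc m : String) (r : List String),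
    pvGrab acc l = (some m, r) →
    mcInner (done ++ l) done.length acc done.length = done ++ m :: r := by
  induction l with
  | nil => intro done acc m r h; simp [pvGrab] at h
  | cons x xs ih =>
      intro done acc m r h
      have hget : (done ++ x :: xs)[done.length]? = some x := by simp
      rw [mcInner]
      split
      · rename_i h'
        rw [hget] at h'
        cases h'
      rename_i y h'
      rw [hget] at h'
      injection h' with h'
      subst h'
      cases hc : pvCloses x
      · simp only [pvGrab, hc, Bool.false_eq_true, if_neg, not_false_iff] at h
        simp only [hc]
        rw [pvEraseMid]
        simpa using ih done (acc ++ x) m r h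
      · simp only [pvGrab, hc, if_pos] at h
        simp only [Prod.mk.injEq, Option.some.injEq] at h
        obtain ⟨hm, hr⟩ := h
        rw [if_neg (by simp [hc])]
        rw [pvEraseMid]
        rw [PySem.List.insert_natCast (done ++ xs) done.length (acc ++ x) (by simp)]
        simp [hm, hr]

-- A's outer loop computes pvMerge on the unprocessed tail
theorem outerA (n : Nat) : ∀ (l done : List String), l.length ≤ n → pvClosed l →
    mcOuter (done ++ l) done.length = done ++ pvMerge l := by
  induction n with
  | zero =>
      intro l done hn _
      have : l = [] := List.eq_nil_of_length_eq_zero (by omega)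
      subst this
      rw [mcOuter]
      split
      · simp [pvMerge_nil]
      · rename_i x h; simp at h
  | succ n ih =>
      intro l done hn hcl
      match l with
      | [] =>
          rw [mcOuter]
          split
          · simp [pvMerge_nil]
          · rename_i x h; simp at h
      | x :: xs =>
          have hget : (done ++ x :: xs)[done.length]? = some x := by simp
          rw [mcOuter]
          split
          · rename_i h'
            rw [hget] at h'
            cases h'
          rename_i y h'
          rw [hget] at h'
          injection h' with h'
          subst h'
          by_cases ho : pvOpens x = true
          · have hany : (x :: xs).any pvCloses = true := hcl.1 ho
            obtain ⟨m, r, hg⟩ := pvGrab_total (x :: xs) "" hany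
            have hr_suffix : r <:+ x :: xs := by
              have := pvGrab_suffix (x :: xs) ""
              rw [hg] at this; exact this
            have hr_len : r.length ≤ xs.length := by
              have := pvGrab_rest_length "" x xs
              rw [hg] at this; exact this
            rw [ho, if_pos rfl]
            rw [innerA (x :: xs) done "" m r hg]
            have hsplit : done ++ m :: r = (done ++ [m]) ++ r := by simp
            rw [hsplit]
            have hlen : done.length + 1 = (done ++ [m]).length := by simp
            rw [hlen]
            rw [ih r (done ++ [m]) (by simp at hn; omega) (pvClosed_suffix hr_suffix hcl)]
            rw [pvMerge_cons_grab ho hg]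
            simp
          · rw [if_neg (by simp [ho])]
            have hsplit : done ++ x :: xs = (done ++ [x]) ++ xs := by simp
            rw [hsplit]
            have hlen : done.length + 1 = (done ++ [x]).length := by simp
            rw [hlen]
            rw [ih xs (done ++ [x]) (by simp at hn; omega) hcl.2]
            rw [pvMerge_cons_not_open (by simpa using ho)]
            simp

-- B's loop with an open buffer runs pvGrab
theorem foldB_buf (l : List String) : ∀ (out : List String) (acc m : String) (r : List String),
    pvGrab acc l = (some m, r) →
    l.foldl mergeStep (out, some acc) = r.foldl mergeStep (out ++ [m], none) := by
  induction l with
  | nil => intro out acc m r h; simp [pvGrab] at h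
  | cons x xs ih =>
      intro out acc m r h
      simp only [List.foldl_cons]
      cases hc : pvCloses x
      · simp only [pvGrab, hc, Bool.false_eq_true, if_neg, not_false_iff] at h
        simp only [mergeStep, hc, Bool.false_eq_true, if_neg, not_false_iff]
        exact ih out (acc ++ x) m r h
      · simp only [pvGrab, hc, if_pos] at h
        simp only [mergeStep, hc, if_pos]
        simp only [Prod.mk.injEq, Option.some.injEq] at h
        rw [h.1, h.2]

-- B's loop with a closed buffer computes pvMerge
theorem foldB_none (n : Nat) : ∀ (l out : List String), l.length ≤ n → pvClosed l →
    (l.foldl mergeStep (out, none)).1 = out ++ pvMerge l := by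
  induction n with
  | zero =>
      intro l out hn _
      have : l = [] := List.eq_nil_of_length_eq_zero (by omega)
      subst this; simp [pvMerge_nil]
  | succ n ih =>
      intro l out hn hcl
      match l with
      | [] => simp [pvMerge_nil]
      | x :: xs =>
          simp only [List.foldl_cons]
          by_cases ho : pvOpens x = true
          · cases hc : pvCloses x
            · simp only [mergeStep, ho, hc, Bool.not_false, Bool.and_true, if_pos]
              have hany : xs.any pvCloses = true := by
                have h1 := hcl.1 ho
                simp only [List.any_cons, hc, Bool.false_or] at h1
                exact h1
              obtain ⟨m, r, hg⟩ := pvGrab_total xs x hany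
              have hgfull : pvGrab "" (x :: xs) = (some m, r) := by
                simp only [pvGrab, hc, Bool.false_eq_true, if_neg, not_false_iff]
                rw [str_empty_append]; exact hg
              have hr_suffix : r <:+ xs := by
                have := pvGrab_suffix xs x
                rw [hg] at this; exact this
              rw [foldB_buf xs out x m r hg]
              rw [ih r (out ++ [m]) (by have := hr_suffix.length_le; simp at hn; omega)
                (pvClosed_suffix (hr_suffix.trans (List.suffix_cons x xs)) hcl)]
              rw [pvMerge_cons_grab ho hgfull]
              simp
            · -- single-element group: B appends x directly
              simp only [mergeStep, ho, hc, Bool.not_true, Bool.and_false, Bool.false_eq_true,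
                if_neg, not_false_iff]
              rw [ih xs (out ++ [x]) (by simp at hn; omega) hcl.2]
              have hg : pvGrab "" (x :: xs) = (some x, xs) := by
                simp [pvGrab, hc]
              rw [pvMerge_cons_grab ho hg]
              simp
          · simp only [mergeStep, ho, Bool.false_and, Bool.false_eq_true, if_neg, not_false_iff]
            rw [ih xs (out ++ [x]) (by simp at hn; omega) hcl.2]
            rw [pvMerge_cons_not_open (by simpa using ho)]
            simp

theorem pre_closed (s : List String) (h : Pre_merge_coordinates s) : pvClosed s := by
  obtain ⟨-, h2⟩ := h
  induction s with
  | nil => trivial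
  | cons x xs ih =>
      refine ⟨fun ho => ?_, ih (fun t ht =>
        h2 t ((List.mem_tails t (x :: xs)).mpr (((List.mem_tails t xs).mp ht).trans
          (List.suffix_cons x xs))))⟩
      have := h2 (x :: xs) ((List.mem_tails (x :: xs) (x :: xs)).mpr (List.suffix_refl _))
      simpa using this ho

-- ===== VERDICT (by name: the statement is the Claim_ definition above) =====
theorem merge_coordinates_spec : Claim_equal_merge_coordinates := by
  intro s _ hpre
  unfold Spec_merge_coordinates merge_coordinates merge_coordinates_alt
  have hcl := pre_closed s hpre
  have hA := outerA s.length s [] (le_refl _) hcl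
  simp only [List.nil_append, List.length_nil] at hA
  rw [hA]
  rw [foldB_none s.length s [] (le_refl _) hcl]
  simp
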